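-- pv_equiv track=rewrite | github.com/beifangwang97-oss/Penetration-Testing | add_question_type_to_sequencing.py | insert_question_type_ordered
-- ===== SOURCE A (Python) =====
-- from collections import OrderedDict
--
-- def insert_question_type_ordered(question: dict, category: str) -> OrderedDict:
--     """
--     将 question_type 插入到第三个位置
--
--     字段顺序：
--     1. question_id
--     2. tactic_technique
--     3. question_type (新插入)
--     4. difficulty
--     5. question
--     6. options
--     7. correct_answer
--     8. explanation
--     9. involved_techniques
--     10. test_prompt
--     """
--     ordered = OrderedDict()
--
--     # 第1个：question_id
--     if "question_id" in question:
--         ordered["question_id"] = question["question_id"]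
--
--     # 第2个：tactic_technique
--     if "tactic_technique" in question:
--         ordered["tactic_technique"] = question["tactic_technique"]
--
--     # 第3个：question_type (新插入)
--     ordered["question_type"] = category
--
--     # 第4个：difficulty
--     if "difficulty" in question:
--         ordered["difficulty"] = question["difficulty"]
--
--     # 第5个：question
--     if "question" in question:
--         ordered["question"] = question["question"]
--
--     # 第6个：options
--     if "options" in question:
--         ordered["options"] = question["options"]
--
--     # 第7个：correct_answer
--     if "correct_answer" in question:
--         ordered["correct_answer"] = question["correct_answer"]
--
--     # 第8个：explanation
--     if "explanation" in question:
--         ordered["explanation"] = question["explanation"]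
--
--     # 第9个：involved_techniques
--     if "involved_techniques" in question:
--         ordered["involved_techniques"] = question["involved_techniques"]
--
--     # 第10个：test_prompt
--     if "test_prompt" in question:
--         ordered["test_prompt"] = question["test_prompt"]
--
--     # 添加可能存在的其他字段（保持原有顺序）
--     for key, value in question.items():
--         if key not in ordered:
--             ordered[key] = value
--
--     return ordered
-- ===== SOURCE B (Python) =====
-- from collections import OrderedDict
--
-- _PRIORITY = {
--     "question_id": 0, "tactic_technique": 1, "question_type": 2,
--     "difficulty": 3, "question": 4, "options": 5, "correct_answer": 6,
--     "explanation": 7, "involved_techniques": 8, "test_prompt": 9,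
-- }
--
-- def insert_question_type_ordered(question: dict, category: str) -> OrderedDict:
--     merged = dict(question)
--     merged["question_type"] = category
--     return OrderedDict(sorted(merged.items(), key=lambda kv: _PRIORITY.get(kv[0], 10)))
-- ===== Notes on version B (the rewrite author's own statement) =====
-- stated objective: alternative
-- what changed: Replaces the hard-coded chain of ten conditional inserts plus a membership-checking append loop by a single stable sort of the merged dict's items under a fixed priority table (unknown keys get sentinel 10, so stability keeps extras in original order).
import Mathlib
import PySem

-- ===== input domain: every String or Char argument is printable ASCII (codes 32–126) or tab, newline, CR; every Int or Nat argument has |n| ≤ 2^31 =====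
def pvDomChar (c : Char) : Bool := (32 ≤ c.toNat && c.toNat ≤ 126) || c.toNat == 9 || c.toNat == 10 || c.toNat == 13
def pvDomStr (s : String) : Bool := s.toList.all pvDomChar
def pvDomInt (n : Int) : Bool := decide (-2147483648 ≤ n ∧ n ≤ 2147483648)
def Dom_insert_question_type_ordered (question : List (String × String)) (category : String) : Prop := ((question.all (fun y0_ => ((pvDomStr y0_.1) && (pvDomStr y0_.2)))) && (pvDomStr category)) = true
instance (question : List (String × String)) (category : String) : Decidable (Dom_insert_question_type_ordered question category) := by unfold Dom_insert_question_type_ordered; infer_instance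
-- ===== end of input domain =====

-- B replaces A's hard-coded chain of ten conditional inserts plus a membership-checking append
-- loop by one stable sort of the merged items under a fixed priority table (alternative, not faster).

-- ===== PORT A =====
def insert_question_type_ordered (question : List (String × String)) (category : String) : List (String × String) :=
  let q := PySem.Dict.ofList question
  let o : PySem.Dict String String := PySem.Dict.empty
  let o := if q.contains "question_id" then o.insert "question_id" (q.getD "question_id" "") else o
  let o := if q.contains "tactic_technique" then o.insert "tactic_technique" (q.getD "tactic_technique" "") else o
  let o := o.insert "question_type" category
  let o := if q.contains "difficulty" then o.insert "difficulty" (q.getD "difficulty" "") else o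
  let o := if q.contains "question" then o.insert "question" (q.getD "question" "") else o
  let o := if q.contains "options" then o.insert "options" (q.getD "options" "") else o
  let o := if q.contains "correct_answer" then o.insert "correct_answer" (q.getD "correct_answer" "") else o
  let o := if q.contains "explanation" then o.insert "explanation" (q.getD "explanation" "") else o
  let o := if q.contains "involved_techniques" then o.insert "involved_techniques" (q.getD "involved_techniques" "") else o
  let o := if q.contains "test_prompt" then o.insert "test_prompt" (q.getD "test_prompt" "") else o
  let o := q.items.foldl (fun o kv => if o.contains kv.1 then o else o.insert kv.1 kv.2) o
  o.items

-- ===== PORT B =====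
def pvPriorityB : PySem.Dict String Nat := PySem.Dict.ofList
  [("question_id", 0), ("tactic_technique", 1), ("question_type", 2), ("difficulty", 3),
   ("question", 4), ("options", 5), ("correct_answer", 6), ("explanation", 7),
   ("involved_techniques", 8), ("test_prompt", 9)]

def insert_question_type_ordered_alt (question : List (String × String)) (category : String) : List (String × String) :=
  let merged := (PySem.Dict.ofList question).insert "question_type" category
  (PySem.Dict.ofList
    (PySem.List.sorted merged.items (fun kv => pvPriorityB.getD kv.1 10) false)).items

-- ===== PRECONDITION & SPEC =====
def Spec_insert_question_type_ordered (question : List (String × String)) (category : String) (out : List (String × String)) : Prop := out = insert_question_type_ordered_alt question category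
instance (question : List (String × String)) (category : String) (out : List (String × String)) : Decidable (Spec_insert_question_type_ordered question category out) := by unfold Spec_insert_question_type_ordered; infer_instance

-- ===== CLAIM (what is proved, stated in full; the proofs are below) =====
def Claim_equal_insert_question_type_ordered : Prop := ∀ (question : List (String × String)) (category : String), Dom_insert_question_type_ordered question category → Spec_insert_question_type_ordered question category (insert_question_type_ordered question category)

-- ===== LEMMAS AND PROOFS =====

def pvFields : List String :=
  ["question_id", "tactic_technique", "question_type", "difficulty", "question",
   "options", "correct_answer", "explanation", "involved_techniques", "test_prompt"]

-- the priority key as an if-chain on the ten field names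
lemma kf_spec (k : String) : pvPriorityB.getD k 10 =
    if k = "question_id" then 0 else if k = "tactic_technique" then 1 else
    if k = "question_type" then 2 else if k = "difficulty" then 3 else
    if k = "question" then 4 else if k = "options" then 5 else
    if k = "correct_answer" then 6 else if k = "explanation" then 7 else
    if k = "involved_techniques" then 8 else if k = "test_prompt" then 9 else 10 := by
  have h : pvPriorityB = PySem.Dict.mk
    [("question_id", 0), ("tactic_technique", 1), ("question_type", 2), ("difficulty", 3),
     ("question", 4), ("options", 5), ("correct_answer", 6), ("explanation", 7),
     ("involved_techniques", 8), ("test_prompt", 9)] := by decide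
  rw [h, PySem.Dict.getD_eq_get?_getD]
  simp only [PySem.Dict.get?_mk_cons, beq_iff_eq, apply_ite (fun o => Option.getD o 10),
    Option.getD_some]
  have hnil : (PySem.Dict.mk ([] : List (String × Nat))).get? k = none := rfl
  simp only [hnil, Option.getD_none, @eq_comm String k]

-- stable insertion: an element goes between the kept prefix and the strictly-greater suffix
lemma insertBy_mid {α : Type} (bf : α → α → Bool) (x : α) (L1 L2 : List α)
    (h1 : ∀ y ∈ L1, bf x y = false) (h2 : ∀ y ∈ L2, bf x y = true) :
    PySem.List.insertBy bf x (L1 ++ L2) = L1 ++ x :: L2 := by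
  induction L1 with
  | nil =>
    cases L2 with
    | nil => rfl
    | cons b t => simp [PySem.List.insertBy, h2 b (by simp)]
  | cons a L1 ih =>
    simp only [List.cons_append, PySem.List.insertBy, h1 a (by simp), Bool.false_eq_true,
      if_false, List.cons.injEq, true_and]
    exact ih (fun y hy => h1 y (by simp [hy]))

lemma flatMap_congr_mem {α β : Type} (l : List α) (f g : α → List β)
    (h : ∀ a ∈ l, f a = g a) : l.flatMap f = l.flatMap g := by
  induction l with
  | nil => rfl
  | cons a t ih => simp only [List.flatMap_cons, h a (by simp),
      ih (fun b hb => h b (by simp [hb]))]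

-- Python's stable sort with a bounded Nat key is bucket concatenation
lemma sorted_buckets {α : Type} (xs : List α) (key : α → Nat) (n : Nat)
    (h : ∀ x ∈ xs, key x < n) :
    PySem.List.sorted xs key false
      = (List.range n).flatMap (fun i => xs.filter (fun x => key x = i)) := by
  induction xs using List.reverseRecOn with
  | nil => simp [show PySem.List.sorted ([]:List α) key false = [] from rfl]
  | append_singleton xs x ih =>
    rw [PySem.List.sorted_eq_foldl_insertBy, List.foldl_append, List.foldl_cons, List.foldl_nil,
      ← PySem.List.sorted_eq_foldl_insertBy, ih (fun y hy => h y (by simp [hy]))]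
    have hk : key x < n := h x (by simp)
    have hsplit : List.range n = List.range (key x + 1) ++ List.range' (key x + 1) (n - (key x + 1)) := by
      have hn : n = (key x + 1) + (n - (key x + 1)) := by omega
      rw [List.range_eq_range']
      conv_lhs => rw [hn]
      rw [← List.range'_append]
      simp [List.range_eq_range']
    set f : Nat → List α := fun i => xs.filter (fun y => key y = i) with hf
    set f' : Nat → List α := fun i => (xs ++ [x]).filter (fun y => key y = i) with hf'
    have hfi : ∀ i, f' i = f i ++ if key x = i then [x] else [] := by
      intro i; simp only [hf, hf', List.filter_append, List.filter_cons, List.filter_nil]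
      split <;> simp_all
    have hL1 : (List.range (key x + 1)).flatMap f' = (List.range (key x + 1)).flatMap f ++ [x] := by
      rw [List.range_succ, List.flatMap_append, List.flatMap_append]
      rw [flatMap_congr_mem (List.range (key x)) f' f (by
        intro i hi; rw [hfi i, if_neg (by simp at hi; omega), List.append_nil])]
      simp [hfi, List.flatMap_cons]
    have hL2 : (List.range' (key x + 1) (n - (key x + 1))).flatMap f'
        = (List.range' (key x + 1) (n - (key x + 1))).flatMap f := by
      apply flatMap_congr_mem
      intro i hi
      rw [hfi i, if_neg (by simp [List.mem_range'] at hi; omega), List.append_nil]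
    rw [hsplit, List.flatMap_append, List.flatMap_append, hL1, hL2]
    rw [List.append_assoc, List.singleton_append]
    apply insertBy_mid
    · intro y hy
      simp only [List.mem_flatMap, hf, List.mem_filter] at hy
      obtain ⟨i, hi, hyf, hkey⟩ := hy
      simp only [decide_eq_false_iff_not, not_lt]
      simp at hkey hi
      omega
    · intro y hy
      simp only [List.mem_flatMap, hf, List.mem_filter] at hy
      obtain ⟨i, hi, hyf, hkey⟩ := hy
      simp only [decide_eq_true_eq]
      simp [List.mem_range'] at hkey hi
      omega

lemma filter_fst_single (l : List (String × String)) (f : String) (v : String)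
    (h : (l.map Prod.fst).Nodup) (hm : (f, v) ∈ l) :
    l.filter (fun kv => kv.1 = f) = [(f, v)] := by
  induction l with
  | nil => simp at hm
  | cons a t ih =>
    simp only [List.map_cons, List.nodup_cons] at h
    rcases List.mem_cons.mp hm with h1 | h1
    · subst h1
      simp only [List.filter_cons, decide_true, if_true, List.cons.injEq, true_and]
      rw [List.filter_eq_nil_iff.mpr]
      intro kv hkv
      simp only [decide_eq_true_eq]
      intro hk
      exact h.1 (hk ▸ (List.mem_map.mpr ⟨kv, hkv, rfl⟩))
    · have haf : a.1 ≠ f := by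
        intro hk
        exact h.1 (hk ▸ (List.mem_map.mpr ⟨(f, v), h1, hk ▸ rfl⟩))
      simp only [List.filter_cons, decide_eq_true_eq, if_neg haf]
      exact ih h.2 h1

lemma filter_key_contains (d : PySem.Dict String String) (f : String)
    (hnd : d.keys.Nodup) (hc : d.contains f = true) :
    d.items.filter (fun kv => kv.1 = f) = [(f, d.getD f "")] := by
  have hs : (d.get? f).isSome := by rw [← PySem.Dict.contains_eq_isSome_get?, hc]
  obtain ⟨v, hv⟩ := Option.isSome_iff_exists.mp hs
  have hmem : (f, v) ∈ d.items := PySem.Dict.mem_items_of_get?_eq_some d hv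
  have hnd' : (d.items.map Prod.fst).Nodup := by
    simpa [PySem.Dict.keys] using hnd
  rw [filter_fst_single d.items f v hnd' hmem, PySem.Dict.getD_of_get?_eq_some d "" hv]

lemma filter_key_not_contains (d : PySem.Dict String String) (f : String)
    (hc : d.contains f = false) :
    d.items.filter (fun kv => kv.1 = f) = [] := by
  rw [List.filter_eq_nil_iff]
  intro kv hkv
  simp only [decide_eq_true_eq]
  intro hk
  have : kv.1 ∈ d.keys := PySem.Dict.mem_keys_of_mem_items d hkv
  rw [PySem.Dict.contains_eq_decide_mem_keys d] at hc
  simp at hc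
  exact hc (hk ▸ this)

lemma bucket_field (m : PySem.Dict String String) (hnd : m.keys.Nodup) (f : String) :
    m.items.filter (fun kv => kv.1 = f)
      = if m.contains f then [(f, m.getD f "")] else [] := by
  by_cases h : m.contains f
  · rw [if_pos h, filter_key_contains m f hnd h]
  · rw [if_neg h, filter_key_not_contains m f (by simpa using h)]

-- the conditional-insert fold over distinct fresh field names appends its hits
lemma foldl_cond_insert (fs : List String) (m : PySem.Dict String String)
    (o : PySem.Dict String String) (hnd : fs.Nodup) (h : ∀ f ∈ fs, o.contains f = false) :
    (fs.foldl (fun o f => if m.contains f then o.insert f (m.getD f "") else o) o).items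
      = o.items ++ (fs.filter (fun f => m.contains f)).map (fun f => (f, m.getD f "")) := by
  induction fs generalizing o with
  | nil => simp
  | cons a fs ih =>
    simp only [List.foldl_cons, List.filter_cons]
    by_cases hm : m.contains a
    · rw [if_pos hm, if_pos hm]
      rw [ih (o.insert a (m.getD a "")) (List.nodup_cons.mp hnd).2 ?_]
      · rw [PySem.Dict.items_insert_of_not_contains o (m.getD a "") (h a (by simp))]
        simp
      · intro f hf
        rw [PySem.Dict.contains_insert _ _ _ _]
        have : f ≠ a := by
          intro hfa; exact (List.nodup_cons.mp hnd).1 (hfa ▸ hf)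
        simp [this, h f (by simp [hf])]
    · rw [if_neg hm, if_neg (by simp [hm])]
      exact ih o (List.nodup_cons.mp hnd).2 (fun f hf => h f (by simp [hf]))

-- A's final loop: with distinct incoming keys, the contains-test only sees the start dict
lemma foldl_skip (l : List (String × String)) (d : PySem.Dict String String)
    (hnd : (l.map Prod.fst).Nodup) :
    (l.foldl (fun o kv => if o.contains kv.1 then o else o.insert kv.1 kv.2) d).items
      = d.items ++ l.filter (fun kv => d.contains kv.1 = false) := by
  induction l generalizing d with
  | nil => simp
  | cons a l ih =>
    simp only [List.foldl_cons, List.filter_cons]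
    simp only [List.map_cons, List.nodup_cons] at hnd
    by_cases hc : d.contains a.1
    · rw [if_pos hc, if_neg (by simp [hc]), ih d hnd.2]
    · rw [if_neg hc, if_pos (by simp [hc]), ih (d.insert a.1 a.2) hnd.2]
      rw [PySem.Dict.items_insert_of_not_contains d a.2 (by simp [hc])]
      rw [List.filter_congr (q := fun kv => decide (d.contains kv.1 = false)) ?_]
      · simp
      · intro kv hkv
        have : kv.1 ≠ a.1 := by
          intro he; exact hnd.1 (he ▸ (List.mem_map.mpr ⟨kv, hkv, rfl⟩))
        rw [PySem.Dict.contains_insert _ _ _ _]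
        simp [this]

lemma ofList_items (l : List (String × String)) (h : (l.map Prod.fst).Nodup) :
    (PySem.Dict.ofList l).items = l := by
  have he : PySem.Dict.ofList l
      = l.foldl (fun d a => d.insert a.1 a.2) PySem.Dict.empty := rfl
  rw [he, PySem.Dict.items_foldl_insert_fresh l Prod.fst Prod.snd _ (by simp) h]
  simp [show (PySem.Dict.empty : PySem.Dict String String).items = [] from rfl]

lemma filter_map_eq_flatMap_if {α β : Type} (fs : List α) (p : α → Bool) (g : α → β) :
    ((fs.filter p).map g) = fs.flatMap (fun f => if p f then [g f] else []) := by
  induction fs with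
  | nil => rfl
  | cons a t ih =>
    simp only [List.filter_cons, List.flatMap_cons, ← ih]
    by_cases h : p a <;> simp [h]

lemma kf_fiber10 : ∀ k : String, (pvPriorityB.getD k 10 = 10) ↔ ¬ (k ∈ pvFields) := by
  intro k
  rw [kf_spec k]
  simp only [pvFields, List.mem_cons, List.not_mem_nil, or_false]
  split_ifs <;> simp_all

lemma bucket_eq (m : PySem.Dict String String) (hnd : m.keys.Nodup) (i : Nat) (f : String)
    (hiff : ∀ k : String, pvPriorityB.getD k 10 = i ↔ k = f) :
    m.items.filter (fun kv => pvPriorityB.getD kv.1 10 = i)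
      = if m.contains f then [(f, m.getD f "")] else [] := by
  rw [List.filter_congr (q := fun kv => decide (kv.1 = f)) (fun kv _ => by simp [hiff kv.1])]
  exact bucket_field m hnd f

lemma kf_fiber0 : ∀ k : String, pvPriorityB.getD k 10 = 0 ↔ k = "question_id" := by
  intro k; rw [kf_spec k]; split_ifs <;> simp_all

lemma bucket0 (m : PySem.Dict String String) (hnd : m.keys.Nodup) :
    m.items.filter (fun kv => pvPriorityB.getD kv.1 10 = 0)
      = if m.contains "question_id" then [("question_id", m.getD "question_id" "")] else [] :=
  bucket_eq m hnd 0 "question_id" kf_fiber0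

lemma kf_fiber1 : ∀ k : String, pvPriorityB.getD k 10 = 1 ↔ k = "tactic_technique" := by
  intro k; rw [kf_spec k]; split_ifs <;> simp_all

lemma bucket1 (m : PySem.Dict String String) (hnd : m.keys.Nodup) :
    m.items.filter (fun kv => pvPriorityB.getD kv.1 10 = 1)
      = if m.contains "tactic_technique" then [("tactic_technique", m.getD "tactic_technique" "")] else [] :=
  bucket_eq m hnd 1 "tactic_technique" kf_fiber1

lemma kf_fiber2 : ∀ k : String, pvPriorityB.getD k 10 = 2 ↔ k = "question_type" := by
  intro k; rw [kf_spec k]; split_ifs <;> simp_all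

lemma bucket2 (m : PySem.Dict String String) (hnd : m.keys.Nodup) :
    m.items.filter (fun kv => pvPriorityB.getD kv.1 10 = 2)
      = if m.contains "question_type" then [("question_type", m.getD "question_type" "")] else [] :=
  bucket_eq m hnd 2 "question_type" kf_fiber2

lemma kf_fiber3 : ∀ k : String, pvPriorityB.getD k 10 = 3 ↔ k = "difficulty" := by
  intro k; rw [kf_spec k]; split_ifs <;> simp_all

lemma bucket3 (m : PySem.Dict String String) (hnd : m.keys.Nodup) :
    m.items.filter (fun kv => pvPriorityB.getD kv.1 10 = 3)
      = if m.contains "difficulty" then [("difficulty", m.getD "difficulty" "")] else [] :=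
  bucket_eq m hnd 3 "difficulty" kf_fiber3

lemma kf_fiber4 : ∀ k : String, pvPriorityB.getD k 10 = 4 ↔ k = "question" := by
  intro k; rw [kf_spec k]; split_ifs <;> simp_all

lemma bucket4 (m : PySem.Dict String String) (hnd : m.keys.Nodup) :
    m.items.filter (fun kv => pvPriorityB.getD kv.1 10 = 4)
      = if m.contains "question" then [("question", m.getD "question" "")] else [] :=
  bucket_eq m hnd 4 "question" kf_fiber4

lemma kf_fiber5 : ∀ k : String, pvPriorityB.getD k 10 = 5 ↔ k = "options" := by
  intro k; rw [kf_spec k]; split_ifs <;> simp_all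

lemma bucket5 (m : PySem.Dict String String) (hnd : m.keys.Nodup) :
    m.items.filter (fun kv => pvPriorityB.getD kv.1 10 = 5)
      = if m.contains "options" then [("options", m.getD "options" "")] else [] :=
  bucket_eq m hnd 5 "options" kf_fiber5

lemma kf_fiber6 : ∀ k : String, pvPriorityB.getD k 10 = 6 ↔ k = "correct_answer" := by
  intro k; rw [kf_spec k]; split_ifs <;> simp_all

lemma bucket6 (m : PySem.Dict String String) (hnd : m.keys.Nodup) :
    m.items.filter (fun kv => pvPriorityB.getD kv.1 10 = 6)
      = if m.contains "correct_answer" then [("correct_answer", m.getD "correct_answer" "")] else [] :=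
  bucket_eq m hnd 6 "correct_answer" kf_fiber6

lemma kf_fiber7 : ∀ k : String, pvPriorityB.getD k 10 = 7 ↔ k = "explanation" := by
  intro k; rw [kf_spec k]; split_ifs <;> simp_all

lemma bucket7 (m : PySem.Dict String String) (hnd : m.keys.Nodup) :
    m.items.filter (fun kv => pvPriorityB.getD kv.1 10 = 7)
      = if m.contains "explanation" then [("explanation", m.getD "explanation" "")] else [] :=
  bucket_eq m hnd 7 "explanation" kf_fiber7

lemma kf_fiber8 : ∀ k : String, pvPriorityB.getD k 10 = 8 ↔ k = "involved_techniques" := by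
  intro k; rw [kf_spec k]; split_ifs <;> simp_all

lemma bucket8 (m : PySem.Dict String String) (hnd : m.keys.Nodup) :
    m.items.filter (fun kv => pvPriorityB.getD kv.1 10 = 8)
      = if m.contains "involved_techniques" then [("involved_techniques", m.getD "involved_techniques" "")] else [] :=
  bucket_eq m hnd 8 "involved_techniques" kf_fiber8

lemma kf_fiber9 : ∀ k : String, pvPriorityB.getD k 10 = 9 ↔ k = "test_prompt" := by
  intro k; rw [kf_spec k]; split_ifs <;> simp_all

lemma bucket9 (m : PySem.Dict String String) (hnd : m.keys.Nodup) :
    m.items.filter (fun kv => pvPriorityB.getD kv.1 10 = 9)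
      = if m.contains "test_prompt" then [("test_prompt", m.getD "test_prompt" "")] else [] :=
  bucket_eq m hnd 9 "test_prompt" kf_fiber9

-- ===== VERDICT (by name: the statement is the Claim_ definition above) =====
set_option maxHeartbeats 1600000 in
theorem insert_question_type_ordered_spec : Claim_equal_insert_question_type_ordered := by
  intro question category _hdom
  unfold Spec_insert_question_type_ordered
  set q : PySem.Dict String String := PySem.Dict.ofList question with hqdef
  set m : PySem.Dict String String := q.insert "question_type" category with hmdef
  have hqnd : q.keys.Nodup := PySem.Dict.nodup_keys_ofList question
  have hmnd : m.keys.Nodup := PySem.Dict.nodup_keys_insert q _ _ hqnd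
  set step : PySem.Dict String String → String → PySem.Dict String String :=
    fun o f => if m.contains f then o.insert f (m.getD f "") else o with hstep
  -- A's ten hard-coded conditional inserts are the fold of `step` over the field list
  have hA : insert_question_type_ordered question category
      = (q.items.foldl (fun o kv => if o.contains kv.1 then o else o.insert kv.1 kv.2)
          (pvFields.foldl step PySem.Dict.empty)).items := by
    have hsteps : ∀ (o : PySem.Dict String String), ∀ f ∈ pvFields, step o f =
        (if f = "question_type" then o.insert f category
         else if q.contains f then o.insert f (q.getD f "") else o) := by
      intro o f hf
      fin_cases hf <;>
        simp [hstep, hmdef, PySem.Dict.contains_insert, PySem.Dict.getD_insert]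
    rw [PySem.List.foldl_congr_mem pvFields step _ PySem.Dict.empty hsteps]
    unfold insert_question_type_ordered
    simp only [pvFields, List.foldl_cons, List.foldl_nil, String.reduceEq, reduceIte, ← hqdef]
  rw [hA]
  have ho10 : (pvFields.foldl step PySem.Dict.empty).items
      = (pvFields.filter (fun f => m.contains f)).map (fun f => (f, m.getD f "")) := by
    rw [hstep, foldl_cond_insert pvFields m PySem.Dict.empty (by decide)
      (fun f _ => PySem.Dict.contains_empty f)]
    simp [show (PySem.Dict.empty : PySem.Dict String String).items = [] from rfl]
  have hcontO : ∀ kv ∈ q.items,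
      (pvFields.foldl step PySem.Dict.empty).contains kv.1 = decide (kv.1 ∈ pvFields) := by
    intro kv hkv
    have h1 : kv.1 ∈ q.keys := PySem.Dict.mem_keys_of_mem_items q hkv
    have h2 : q.contains kv.1 = true := by
      rw [PySem.Dict.contains_eq_decide_mem_keys q]; simpa
    have hqc : m.contains kv.1 = true := by
      rw [hmdef, PySem.Dict.contains_insert _ _ _ _, h2, Bool.or_true]
    rw [PySem.Dict.contains_eq_decide_mem_keys]
    have hk : (pvFields.foldl step PySem.Dict.empty).keys
        = pvFields.filter (fun f => m.contains f) := by
      simp only [PySem.Dict.keys, ho10, List.map_map]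
      simp [Function.comp_def]
    rw [hk]
    by_cases hmem : kv.1 ∈ pvFields
    · simp [List.mem_filter, hmem, hqc]
    · simp [List.mem_filter, hmem]
  have hfstq : (q.items.map Prod.fst).Nodup := by simpa [PySem.Dict.keys] using hqnd
  rw [foldl_skip q.items _ hfstq, ho10]
  have htailA : q.items.filter
      (fun kv => decide ((pvFields.foldl step PySem.Dict.empty).contains kv.1 = false))
      = q.items.filter (fun kv => !decide (kv.1 ∈ pvFields)) :=
    List.filter_congr (fun kv hkv => by simp [hcontO kv hkv])
  rw [htailA]
  -- B side
  have hbound : ∀ kv ∈ m.items, (fun kv : String × String => pvPriorityB.getD kv.1 10) kv < 11 := by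
    intro kv _
    show pvPriorityB.getD kv.1 10 < 11
    rw [kf_spec kv.1]
    split_ifs <;> omega
  have hmfst : (m.items.map Prod.fst).Nodup := by simpa [PySem.Dict.keys] using hmnd
  have hsortnd : ((PySem.List.sorted m.items
      (fun kv => pvPriorityB.getD kv.1 10) false).map Prod.fst).Nodup := by
    have hp := PySem.List.sorted_perm m.items (fun kv => pvPriorityB.getD kv.1 10) false
    exact (hp.map Prod.fst).nodup_iff.mpr hmfst
  unfold insert_question_type_ordered_alt
  simp only [← hqdef, ← hmdef]
  rw [ofList_items _ hsortnd, sorted_buckets m.items _ 11 hbound]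
  have hr : List.range 11 = [0,1,2,3,4,5,6,7,8,9,10] := by decide
  rw [hr]
  simp only [List.flatMap_cons, List.flatMap_nil, List.append_nil]
  simp only [bucket0 m hmnd, bucket1 m hmnd, bucket2 m hmnd, bucket3 m hmnd,
    bucket4 m hmnd, bucket5 m hmnd, bucket6 m hmnd, bucket7 m hmnd, bucket8 m hmnd,
    bucket9 m hmnd]
  have hb10 : m.items.filter (fun kv => pvPriorityB.getD kv.1 10 = 10)
      = q.items.filter (fun kv => !decide (kv.1 ∈ pvFields)) := by
    rw [List.filter_congr (q := fun kv => !decide (kv.1 ∈ pvFields))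
      (fun kv _ => by
        show decide (pvPriorityB.getD kv.1 10 = 10) = !decide (kv.1 ∈ pvFields)
        rw [← decide_not]
        exact decide_eq_decide.mpr (kf_fiber10 kv.1))]
    by_cases hcq : q.contains "question_type"
    · rw [hmdef, PySem.Dict.items_insert_of_contains q category hcq, List.filter_map]
      have hpe : ∀ kv ∈ q.items, ((fun kv : String × String => !decide (kv.1 ∈ pvFields)) ∘
          (fun p => if p.1 == "question_type" then ("question_type", category) else p)) kv
          = (fun kv : String × String => !decide (kv.1 ∈ pvFields)) kv := by
        intro kv _
        by_cases h : kv.1 = "question_type" <;> simp [h, pvFields]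
      rw [List.filter_congr hpe]
      have hid : ∀ kv ∈ q.items.filter (fun kv : String × String => !decide (kv.1 ∈ pvFields)),
          (fun p : String × String =>
            if p.1 == "question_type" then ("question_type", category) else p) kv = kv := by
        intro kv hkv
        have hne := (List.mem_filter.mp hkv).2
        simp only [pvFields, List.mem_cons, Bool.not_eq_true', decide_eq_false_iff_not] at hne
        push_neg at hne
        simp [hne.2.2.1]
      rw [List.map_congr_left hid]
      simp
    · rw [hmdef, PySem.Dict.items_insert_of_not_contains q category (by simpa using hcq),
        List.filter_append]
      simp [pvFields]
  rw [hb10, filter_map_eq_flatMap_if]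
  simp only [pvFields, List.flatMap_cons, List.flatMap_nil, List.append_nil, List.append_assoc]
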